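-- pv_equiv track=rewrite | github.com/ProtonVPN/python-proton-vpn-api-core | proton/vpn/session/servers/types.py | __unpack_bitmap_features
-- ===== SOURCE A (Python) =====
-- from enum import IntFlag
--
-- class ServerFeatureEnum(IntFlag):
--     """
--     A Class representing the Server features as encoded in the feature flags field of the API:
--     """
--     SECURE_CORE = 1 << 0  # 1
--     TOR = 1 << 1  # 2
--     P2P = 1 << 2  # 4
--     STREAMING = 1 << 3  # 8
--     IPV6 = 1 << 4  # 16
--
-- def __unpack_bitmap_features(server_value):
--     server_features = [
--         feature_enum
--         for feature_enum
--         in ServerFeatureEnum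
--         if (server_value & feature_enum) != 0
--     ]
--     return server_features
-- ===== SOURCE B (Python) =====
-- from enum import IntFlag
--
-- class ServerFeatureEnum(IntFlag):
--     SECURE_CORE = 1 << 0
--     TOR = 1 << 1
--     P2P = 1 << 2
--     STREAMING = 1 << 3
--     IPV6 = 1 << 4
--
-- def __unpack_bitmap_features(server_value):
--     # Decode by extracting set bits low-to-high instead of scanning every member.
--     bits = server_value & 31  # mask of all defined features
--     features = []
--     while bits:
--         low = bits & -bits
--         features.append(ServerFeatureEnum(low))
--         bits &= bits - 1
--     return features
-- ===== Notes on version B (the rewrite author's own statement) =====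
-- stated objective: alternative
-- what changed: B decodes the integer itself: it masks server_value with the union of all defined feature bits and then repeatedly extracts the lowest set bit (bits & -bits, bits &= bits-1), instead of scanning every enum member and testing it against the value.
import Mathlib
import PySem

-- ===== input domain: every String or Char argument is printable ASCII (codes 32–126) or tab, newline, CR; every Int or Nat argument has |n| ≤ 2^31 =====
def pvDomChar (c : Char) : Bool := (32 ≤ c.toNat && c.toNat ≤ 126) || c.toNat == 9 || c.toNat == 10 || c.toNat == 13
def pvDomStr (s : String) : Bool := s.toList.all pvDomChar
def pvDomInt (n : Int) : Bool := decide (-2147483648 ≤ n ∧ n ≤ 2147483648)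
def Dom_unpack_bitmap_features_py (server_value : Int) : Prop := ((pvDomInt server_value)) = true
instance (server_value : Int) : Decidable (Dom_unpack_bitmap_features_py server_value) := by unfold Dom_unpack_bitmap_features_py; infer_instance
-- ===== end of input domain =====

-- B decodes the bitmap by extracting its set bits low-to-high (after masking with the
-- union of all feature bits) instead of scanning every enum member; same result, no speed claim.


-- ===== PORT A =====
-- Enum members appear as their integer values; iteration over ServerFeatureEnum is the
-- list of members in definition order. Python's `&` on ints = two's-complement Int.land (exact).
def unpack_bitmap_features_py (server_value : Int) : List Int :=
  ([1, 2, 4, 8, 16] : List Int).foldl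
    (fun acc feature_enum =>
      if Int.land server_value feature_enum ≠ 0 then acc ++ [feature_enum] else acc) []

-- ===== PORT B =====
-- Termination lemma for the bit-drain loop (cited by `decreasing_by`).
theorem pvLandPredToNatLt (b : Int) (h : 0 < b) : (Int.land b (b - 1)).toNat < b.toNat := by
  cases b with
  | ofNat m =>
    cases m with
    | zero => exact absurd h (by decide)
    | succ k =>
      have : Int.land (Int.ofNat (k + 1)) (Int.ofNat (k + 1) - 1) = Int.ofNat ((k + 1) &&& k) := by
        simp [Int.land]
        rfl
      rw [this]
      simpa using Nat.lt_succ_of_le (Nat.and_le_right)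
  | negSucc m => simp [Int.negSucc_eq] at h; omega

-- `while bits: low = bits & -bits; append low; bits &= bits - 1` — the `b ≤ 0` guard only
-- makes the recursion total (the loop is entered with a masked, hence nonnegative, value).
def pvDrainBits (b : Int) : List Int :=
  if h : b ≤ 0 then []
  else Int.land b (-b) :: pvDrainBits (Int.land b (b - 1))
termination_by b.toNat
decreasing_by exact pvLandPredToNatLt b (by omega)

def unpack_bitmap_features_py_alt (server_value : Int) : List Int :=
  pvDrainBits (Int.land server_value 31)

-- ===== PRECONDITION & SPEC =====
def Spec_unpack_bitmap_features_py (server_value : Int) (out : List Int) : Prop := out = unpack_bitmap_features_py_alt server_value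
instance (server_value : Int) (out : List Int) : Decidable (Spec_unpack_bitmap_features_py server_value out) := by unfold Spec_unpack_bitmap_features_py; infer_instance

-- ===== CLAIM (what is proved, stated in full; the proofs are below) =====
def Claim_equal_unpack_bitmap_features_py : Prop := ∀ (server_value : Int), Dom_unpack_bitmap_features_py server_value → Spec_unpack_bitmap_features_py server_value (unpack_bitmap_features_py server_value)

-- ===== LEMMAS AND PROOFS =====

-- For f < 32, every set bit of f is a set bit of 31.
theorem pvBitOf31 (f i : Nat) (hf : f < 32) (h : Nat.testBit f i = true) :
    Nat.testBit 31 i = true := by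
  by_cases hi : i < 5
  · interval_cases i <;> decide
  · have : Nat.testBit f i = false :=
      Nat.testBit_lt_two_pow (lt_of_lt_of_le hf (by
        have : (32 : Nat) = 2 ^ 5 := by decide
        rw [this]
        exact Nat.pow_le_pow_right (by decide) (by omega)))
    simp [this] at h

theorem pvAnd31 (f : Nat) (hf : f < 32) : 31 &&& f = f := by
  apply Nat.eq_of_testBit_eq
  intro i
  rcases h : Nat.testBit f i with _ | _
  · simp [Nat.testBit_and, h]
  · simp [Nat.testBit_and, h, pvBitOf31 f i hf h]

theorem pvLdiff31 (f m : Nat) (hf : f < 32) :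
    Nat.ldiff f m = Nat.ldiff 31 m &&& f := by
  apply Nat.eq_of_testBit_eq
  intro i
  rcases h : Nat.testBit f i with _ | _
  · simp [Nat.testBit_and, Nat.testBit_ldiff, h]
  · simp [Nat.testBit_and, Nat.testBit_ldiff, h, pvBitOf31 f i hf h]

theorem pvLdiff31_lt (m : Nat) : Nat.ldiff 31 m < 32 := by
  have h : Nat.ldiff 31 m ≤ 31 := by
    have := Nat.eq_of_testBit_eq (x := Nat.ldiff 31 m &&& 31) (y := Nat.ldiff 31 m)
      (fun i => by
        rcases h : Nat.testBit (Nat.ldiff 31 m) i with _ | _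
        · simp [Nat.testBit_and, h]
        · have h31 : Nat.testBit 31 i = true := by
            have := Nat.testBit_ldiff 31 m i
            rw [h] at this
            exact (Bool.and_eq_true _ _ ▸ this.symm) |>.1
          simp [Nat.testBit_and, h, h31])
    calc Nat.ldiff 31 m = Nat.ldiff 31 m &&& 31 := this.symm
      _ ≤ 31 := Nat.and_le_right
  omega

-- Both ports depend only on the five feature bits: the masked value is a Nat below 32,
-- and every `server_value & f` (f < 32) equals `n &&& f` for that masked value n.
theorem pvMaskCase (sv : Int) :
    ∃ n : Nat, n < 32 ∧ Int.land sv 31 = Int.ofNat n ∧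
      ∀ f : Nat, f < 32 → Int.land sv (Int.ofNat f) = Int.ofNat (n &&& f) := by
  cases sv with
  | ofNat m =>
    refine ⟨m &&& 31, lt_of_le_of_lt Nat.and_le_right (by decide), by simp [Int.land], ?_⟩
    intro f hf
    have : (m &&& 31) &&& f = m &&& f := by
      rw [Nat.land_assoc, pvAnd31 f hf]
    simp [Int.land, this]
  | negSucc m =>
    refine ⟨Nat.ldiff 31 m, pvLdiff31_lt m, by simp [Int.land], ?_⟩
    intro f hf
    simp [Int.land, pvLdiff31 f m hf]

-- Literal evaluation of Nat.ldiff a (a-1) (Nat.bitwise is not kernel-reducible).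
theorem pvLowFact (a : Nat) (h : a < 32) : Nat.ldiff a (a - 1) = a - (a &&& (a - 1)) := by
  interval_cases a <;> simp [Nat.ldiff, Nat.bitwise]

-- `b & -b` (lowest set bit) as a subtraction, for positive b below 32.
theorem pvLowStep (k : Nat) (h : k + 1 < 32) :
    Int.land (Int.ofNat (k + 1)) (-(Int.ofNat (k + 1))) =
      Int.ofNat (k + 1) - Int.land (Int.ofNat (k + 1)) (Int.ofNat k) := by
  have h1 : -(Int.ofNat (k + 1)) = Int.negSucc k := rfl
  rw [h1]
  have h2 : Int.land (Int.ofNat (k + 1)) (Int.negSucc k) = Int.ofNat (Nat.ldiff (k + 1) k) := by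
    simp [Int.land]
  have h3 : Int.land (Int.ofNat (k + 1)) (Int.ofNat k) = Int.ofNat ((k + 1) &&& k) := by
    simp [Int.land]
  rw [h2, h3]
  have h4 := pvLowFact (k + 1) h
  have h5 : (k + 1) &&& k ≤ k := Nat.and_le_right
  simp only [Nat.add_sub_cancel] at h4
  simp only [Int.ofNat_eq_natCast]
  omega

-- Structural (fuel-indexed) evaluator of the drain loop, so the kernel can compute it.
def pvDrainFuel : Nat → Int → List Int
  | 0, _ => []
  | fuel + 1, b =>
    if b ≤ 0 then []
    else (b - Int.land b (b - 1)) :: pvDrainFuel fuel (Int.land b (b - 1))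

theorem pvDrainBits_eq_fuel : ∀ (fuel : Nat) (b : Int), 0 ≤ b → b.toNat < 32 →
    b.toNat < fuel → pvDrainBits b = pvDrainFuel fuel b := by
  intro fuel
  induction fuel with
  | zero => intro b _ _ h; omega
  | succ f ih =>
    intro b hb h32 hf
    rw [pvDrainBits]
    by_cases hb0 : b ≤ 0
    · simp [pvDrainFuel, hb0]
    · obtain ⟨k, hk⟩ : ∃ k : Nat, b = Int.ofNat (k + 1) := by
        cases b with
        | ofNat m =>
          match m with
          | 0 => exact absurd (by decide) hb0
          | j + 1 => exact ⟨j, rfl⟩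
        | negSucc m => exact absurd (by simp [Int.negSucc_eq]) hb0
      subst hk
      have hk32 : k + 1 < 32 := by simpa using h32
      have hsub : (Int.ofNat (k + 1) - 1) = Int.ofNat k := by
        simp only [Int.ofNat_eq_natCast]
        omega
      have hland : Int.land (Int.ofNat (k + 1)) (Int.ofNat (k + 1) - 1) =
          Int.ofNat ((k + 1) &&& k) := by
        rw [hsub]
        simp [Int.land]
      have hlow : Int.land (Int.ofNat (k + 1)) (-(Int.ofNat (k + 1))) =
          Int.ofNat (k + 1) - Int.land (Int.ofNat (k + 1)) (Int.ofNat (k + 1) - 1) := by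
        rw [hsub]
        exact pvLowStep k hk32
      have hle : (k + 1) &&& k ≤ k := Nat.and_le_right
      have hnext : (Int.land (Int.ofNat (k + 1)) (Int.ofNat (k + 1) - 1)).toNat < k + 1 := by
        rw [hland]
        simpa using Nat.lt_succ_of_le hle
      rw [hlow, ih (Int.land (Int.ofNat (k + 1)) (Int.ofNat (k + 1) - 1))
        (by rw [hland]; exact Int.natCast_nonneg _) (by omega)
        (by have h9 : k + 1 < f + 1 := by simpa using hf
            omega)]
      simp [pvDrainFuel]

-- ===== VERDICT (by name: the statement is the Claim_ definition above) =====
theorem unpack_bitmap_features_py_spec : Claim_equal_unpack_bitmap_features_py := by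
  intro sv _
  unfold Spec_unpack_bitmap_features_py unpack_bitmap_features_py unpack_bitmap_features_py_alt
  obtain ⟨n, hn, hmask, hf⟩ := pvMaskCase sv
  rw [hmask]
  have h1 : Int.land sv 1 = Int.ofNat (n &&& 1) := hf 1 (by decide)
  have h2 : Int.land sv 2 = Int.ofNat (n &&& 2) := hf 2 (by decide)
  have h4 : Int.land sv 4 = Int.ofNat (n &&& 4) := hf 4 (by decide)
  have h8 : Int.land sv 8 = Int.ofNat (n &&& 8) := hf 8 (by decide)
  have h16 : Int.land sv 16 = Int.ofNat (n &&& 16) := hf 16 (by decide)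
  simp only [List.foldl, h1, h2, h4, h8, h16]
  rw [pvDrainBits_eq_fuel 32 (Int.ofNat n) (Int.natCast_nonneg n) (by simpa using hn) (by simpa using hn)]
  interval_cases n <;> decide
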